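-- pv_equiv track=rewrite | github.com/SonVH2511/CTFs | _non_event_CTF/Thuật toán ATTT/Bai33.py | sub_gf2
-- ===== SOURCE A (Python) =====
-- def sub_gf2(a, b):
--     len_a = len(a)
--     len_b = len(b)
--
--     if len_a > len_b:
--         b = [0] * (len_a - len_b) + b
--     elif len_b > len_a:
--         a = [0] * (len_b - len_a) + a
--
--     return [x ^ y for x, y in zip(a, b)]
-- ===== SOURCE B (Python) =====
-- def sub_gf2(a, b):
--     # Merge from the tails: pop matching last elements and XOR them,
--     # then drain whichever list is left, building the result reversed.
--     x, y = list(a), list(b)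
--     out = []
--     while x and y:
--         out.append(x.pop() ^ y.pop())
--     rest = x if x else y
--     while rest:
--         out.append(rest.pop())
--     out.reverse()
--     return out
-- ===== Notes on version B (the rewrite author's own statement) =====
-- stated objective: alternative
-- what changed: Instead of left-padding the shorter list with zeros and XORing over a single zipped pass, B merges the two lists from their tails (popping and XORing last elements, then draining the leftover list) while building the output reversed, and reverses it at the end.
import Mathlib
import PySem

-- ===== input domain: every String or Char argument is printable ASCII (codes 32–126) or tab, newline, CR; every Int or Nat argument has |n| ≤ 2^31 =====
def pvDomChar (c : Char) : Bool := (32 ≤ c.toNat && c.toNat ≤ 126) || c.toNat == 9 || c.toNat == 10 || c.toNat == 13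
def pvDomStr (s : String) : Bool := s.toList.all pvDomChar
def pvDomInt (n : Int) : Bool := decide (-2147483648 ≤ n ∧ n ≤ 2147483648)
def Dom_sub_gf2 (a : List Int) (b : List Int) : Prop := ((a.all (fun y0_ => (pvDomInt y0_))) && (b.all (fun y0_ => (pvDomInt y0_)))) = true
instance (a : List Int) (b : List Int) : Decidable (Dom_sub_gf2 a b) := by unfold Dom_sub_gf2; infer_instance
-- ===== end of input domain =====

-- B replaces A's pad-then-zip pass by a merge from the tails: pop the last elements of both
-- lists, XOR them, drain the leftover list, and reverse the accumulated output (alternative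
-- decomposition, same cost).

-- ===== PORT A =====
def sub_gf2 (a : List Int) (b : List Int) : List Int :=
  let len_a : Int := a.length
  let len_b : Int := b.length
  if len_a > len_b then
    ((a.zip (List.replicate (len_a - len_b).toNat 0 ++ b)).map fun (p : Int × Int) => PySem.Int.bxor p.1 p.2)
  else if len_b > len_a then
    (((List.replicate (len_b - len_a).toNat 0 ++ a).zip b).map fun (p : Int × Int) => PySem.Int.bxor p.1 p.2)
  else
    ((a.zip b).map fun (p : Int × Int) => PySem.Int.bxor p.1 p.2)

-- ===== PORT B =====
-- Python's `rest.pop()` loop: append each element of `rest` from its end onto out.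
-- We model a Python list read from its END by its reversed Lean list, so pop() = head;
-- this is exact: the same values are appended in the same order.
def pvDrain (rest : List Int) (out : List Int) : List Int :=
  match rest, out with
  | [], out => out
  | h :: t, out => pvDrain t (out ++ [h])

-- the `while x and y` loop followed by draining `rest = x if x else y`
-- (x, y are the reversed Lean views of Python's lists, so pop() = take the head)
def pvMerge (x y out : List Int) : List Int :=
  match x, y, out with
  | xh :: xt, yh :: yt, out => pvMerge xt yt (out ++ [PySem.Int.bxor xh yh])
  | x, y, out => pvDrain (if x.isEmpty then y else x) out

def sub_gf2_alt (a : List Int) (b : List Int) : List Int :=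
  (pvMerge a.reverse b.reverse []).reverse

-- ===== PRECONDITION & SPEC =====
def Spec_sub_gf2 (a : List Int) (b : List Int) (out : List Int) : Prop := out = sub_gf2_alt a b
instance (a : List Int) (b : List Int) (out : List Int) : Decidable (Spec_sub_gf2 a b out) := by unfold Spec_sub_gf2; infer_instance

-- ===== CLAIM (what is proved, stated in full; the proofs are below) =====
def Claim_equal_sub_gf2 : Prop := ∀ (a : List Int) (b : List Int), Dom_sub_gf2 a b → Spec_sub_gf2 a b (sub_gf2 a b)

-- ===== LEMMAS AND PROOFS =====

theorem pv_drain_eq (t out : List Int) : pvDrain t out = out ++ t := by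
  induction t generalizing out with
  | nil => simp [pvDrain]
  | cons h t ih => simp [pvDrain, ih]

-- The tail-merge in closed form: XORed overlap followed by the untouched remainder.
theorem pv_merge_eq (x y out : List Int) :
    pvMerge x y out
      = out ++ ((x.zip y).map fun (p : Int × Int) => PySem.Int.bxor p.1 p.2)
            ++ (x.drop y.length ++ y.drop x.length) := by
  induction x generalizing y out with
  | nil => simp [pvMerge, pv_drain_eq]
  | cons xh xt ih =>
    cases y with
    | nil => simp [pvMerge, pv_drain_eq]
    | cons yh yt => simp [pvMerge, ih]

-- zip of equal-length reverses = reverse of the zip (then mapped).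
theorem pv_zip_rev (u v : List Int) (h : u.length = v.length) :
    ((u.reverse.zip v.reverse).map fun (p : Int × Int) => PySem.Int.bxor p.1 p.2)
      = (((u.zip v).map fun (p : Int × Int) => PySem.Int.bxor p.1 p.2)).reverse := by
  have hz : u.reverse.zip v.reverse = (u.zip v).reverse := by
    simpa [List.zip] using (List.reverse_zipWith (f := Prod.mk) (l := u) (l' := v) h).symm
  rw [hz, List.map_reverse]

-- XORing list elements against enough zeros on the right is the identity.
theorem pv_zip_zero_r (xs : List Int) (k : Nat) (h : xs.length ≤ k) :
    ((xs.zip (List.replicate k (0:Int))).map fun (p : Int × Int) => PySem.Int.bxor p.1 p.2) = xs := by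
  induction xs generalizing k with
  | nil => simp
  | cons x xs ih =>
    cases k with
    | zero => simp at h
    | succ k => simp [List.replicate_succ, ih k (by simpa using h)]

-- Same with the zeros on the left.
theorem pv_zip_zero_l (xs : List Int) (k : Nat) (h : xs.length ≤ k) :
    (((List.replicate k (0:Int)).zip xs).map fun (p : Int × Int) => PySem.Int.bxor p.1 p.2) = xs := by
  induction xs generalizing k with
  | nil => simp
  | cons x xs ih =>
    cases k with
    | zero => simp at h
    | succ k => simp [List.replicate_succ, PySem.Int.bxor_comm, ih k (by simpa using h)]

-- A with a shorter right operand = untouched prefix ++ XOR of the overlap.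
theorem pv_pad_right (a b : List Int) (k : Nat) (hk : k + b.length = a.length) :
    ((a.zip (List.replicate k (0:Int) ++ b)).map fun (p : Int × Int) => PySem.Int.bxor p.1 p.2)
      = a.take k ++ ((a.drop k).zip b).map fun (p : Int × Int) => PySem.Int.bxor p.1 p.2 := by
  conv_lhs => rw [← List.take_append_drop k a]
  rw [List.zip_append (by simp; omega), List.map_append,
    pv_zip_zero_r (a.take k) k (by simp)]

-- Same for a shorter left operand.
theorem pv_pad_left (a b : List Int) (k : Nat) (hk : k + a.length = b.length) :
    (((List.replicate k (0:Int) ++ a).zip b).map fun (p : Int × Int) => PySem.Int.bxor p.1 p.2)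
      = b.take k ++ (a.zip (b.drop k)).map fun (p : Int × Int) => PySem.Int.bxor p.1 p.2 := by
  conv_lhs => rw [← List.take_append_drop k b]
  rw [List.zip_append (by simp; omega), List.map_append,
    pv_zip_zero_l (b.take k) k (by simp)]

-- B in closed form: the longer list's prefix followed by the XOR of the right-aligned overlap.
theorem pv_alt_eq_r (a b : List Int) (hk : b.length ≤ a.length) :
    sub_gf2_alt a b
      = a.take (a.length - b.length)
        ++ ((a.drop (a.length - b.length)).zip b).map fun (p : Int × Int) => PySem.Int.bxor p.1 p.2 := by
  set k := a.length - b.length with hkdef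
  unfold sub_gf2_alt
  rw [pv_merge_eq]
  have hsplit : a.reverse = (a.drop k).reverse ++ (a.take k).reverse := by
    rw [← List.reverse_append, List.take_append_drop]
  have hlen : (a.drop k).reverse.length = b.reverse.length := by simp; omega
  have hzip : a.reverse.zip b.reverse = (a.drop k).reverse.zip b.reverse := by
    conv_lhs => rw [hsplit, show b.reverse = b.reverse ++ ([] : List Int) by simp]
    rw [List.zip_append hlen]; simp
  have hdb : b.reverse.drop a.reverse.length = [] := by
    apply List.drop_eq_nil_of_le; simp; omega
  have hda : a.reverse.drop b.reverse.length = (a.take k).reverse := by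
    have hkk : a.length - b.reverse.length = k := by
      simp only [List.length_reverse]; omega
    rw [List.drop_reverse, hkk]
  rw [hzip, pv_zip_rev _ _ (by simp; omega), hdb, hda]
  simp

theorem pv_alt_eq_l (a b : List Int) (hk : a.length < b.length) :
    sub_gf2_alt a b
      = b.take (b.length - a.length)
        ++ (a.zip (b.drop (b.length - a.length))).map fun (p : Int × Int) => PySem.Int.bxor p.1 p.2 := by
  set k := b.length - a.length with hkdef
  unfold sub_gf2_alt
  rw [pv_merge_eq]
  have hsplit : b.reverse = (b.drop k).reverse ++ (b.take k).reverse := by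
    rw [← List.reverse_append, List.take_append_drop]
  have hlen : a.reverse.length = (b.drop k).reverse.length := by simp; omega
  have hzip : a.reverse.zip b.reverse = a.reverse.zip (b.drop k).reverse := by
    conv_lhs => rw [hsplit, show a.reverse = a.reverse ++ ([] : List Int) by simp]
    rw [List.zip_append hlen]; simp
  have hda : a.reverse.drop b.reverse.length = [] := by
    apply List.drop_eq_nil_of_le; simp; omega
  have hdb : b.reverse.drop a.reverse.length = (b.take k).reverse := by
    have hkk : b.length - a.reverse.length = k := by
      simp only [List.length_reverse]; omega
    rw [List.drop_reverse, hkk]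
  rw [hzip, pv_zip_rev _ _ (by simp; omega), hda, hdb]
  simp

-- ===== VERDICT (by name: the statement is the Claim_ definition above) =====
theorem sub_gf2_spec : Claim_equal_sub_gf2 := by
  intro a b _
  unfold Spec_sub_gf2 sub_gf2
  simp only []
  rcases lt_trichotomy b.length a.length with h | h | h
  · have hg : (a.length : Int) > (b.length : Int) := by exact_mod_cast h
    rw [if_pos hg]
    have hk : ((a.length : Int) - (b.length : Int)).toNat = a.length - b.length := by omega
    rw [hk, pv_pad_right a b (a.length - b.length) (by omega),
      pv_alt_eq_r a b (le_of_lt h)]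
  · have hg : ¬ ((a.length : Int) > (b.length : Int)) := by omega
    have hg2 : ¬ ((b.length : Int) > (a.length : Int)) := by omega
    rw [if_neg hg, if_neg hg2, pv_alt_eq_r a b (by omega)]
    simp [h]
  · have hg : ¬ ((a.length : Int) > (b.length : Int)) := by omega
    have hg2 : ((b.length : Int) > (a.length : Int)) := by exact_mod_cast h
    rw [if_neg hg, if_pos hg2]
    have hk : ((b.length : Int) - (a.length : Int)).toNat = b.length - a.length := by omega
    rw [hk, pv_pad_left a b (b.length - a.length) (by omega), pv_alt_eq_l a b h]
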